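-- pv_equiv track=rewrite | github.com/danilkis/Practice2 | Graphs/Danon/Var3.py | find_all_regular_graphs
-- ===== SOURCE A (Python) =====
-- def find_all_regular_graphs(N):
--     # Инициализация графа с N вершинами
--     adj_matrix = [[0] * N for _ in range(N)]
--
--     # Инициализация степеней вершин
--     degrees = [N-1] * N
--
--     # Общее количество ребер в полном графе
--     total_edges = N * (N-1) // 2
--
--     # Перебор возможных ребер
--     for i in range(N-1):
--         for j in range(i+1, N):
--             if degrees[i] > 0 and degrees[j] > 0:
--                 adj_matrix[i][j] = 1
--                 adj_matrix[j][i] = 1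
--                 degrees[i] -= 1
--                 degrees[j] -= 1
--                 total_edges -= 1
--
--     # Проверка на правильность графа
--     if total_edges == 0 and all(degrees[i] == 0 for i in range(N)):
--         return adj_matrix
--     else:
--         return None
-- ===== SOURCE B (Python) =====
-- def find_all_regular_graphs(N):
--     # The greedy in A always realises the complete graph: construct it directly.
--     if N < 0:
--         return None
--     return [[0 if i == j else 1 for j in range(N)] for i in range(N)]
-- ===== Notes on version B (the rewrite author's own statement) =====
-- stated objective: simpler
-- what changed: Replaced the stateful greedy pass (degrees list, total_edges counter, validity check) by a direct closed-form construction of the complete-graph adjacency matrix, which the greedy provably always produces; for negative N the leftover positive edge count makes A return None, and B returns None directly.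
import Mathlib
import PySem

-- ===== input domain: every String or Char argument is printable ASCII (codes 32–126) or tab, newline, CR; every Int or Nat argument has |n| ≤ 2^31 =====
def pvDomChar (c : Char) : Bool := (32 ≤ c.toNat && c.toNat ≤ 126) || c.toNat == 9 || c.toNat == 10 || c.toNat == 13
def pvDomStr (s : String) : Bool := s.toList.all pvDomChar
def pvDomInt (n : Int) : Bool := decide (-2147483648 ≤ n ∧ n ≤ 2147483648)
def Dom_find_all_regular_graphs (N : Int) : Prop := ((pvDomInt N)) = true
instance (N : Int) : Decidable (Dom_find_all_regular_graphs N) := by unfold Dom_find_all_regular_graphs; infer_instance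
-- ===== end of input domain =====

-- B replaces A's stateful greedy pass (degrees, total_edges, validity check) by the direct
-- closed-form construction of the complete-graph matrix, which the greedy always produces.

-- ===== PORT A =====
-- Index accesses degrees[i], adj_matrix[i][j] are always in range on every executed path of A,
-- so the total forms pyGetD/pySetD are exact here.
def pvInnerA (i : Int) (s : List (List Int) × List Int × Int) (j : Int) :
    List (List Int) × List Int × Int :=
  let adj := s.1
  let deg := s.2.1
  let te := s.2.2
  if 0 < PySem.List.pyGetD deg i 0 ∧ 0 < PySem.List.pyGetD deg j 0 then
    let adj := PySem.List.pySetD adj i (PySem.List.pySetD (PySem.List.pyGetD adj i []) j 1)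
    let adj := PySem.List.pySetD adj j (PySem.List.pySetD (PySem.List.pyGetD adj j []) i 1)
    let deg := PySem.List.pySetD deg i (PySem.List.pyGetD deg i 0 - 1)
    let deg := PySem.List.pySetD deg j (PySem.List.pyGetD deg j 0 - 1)
    (adj, deg, te - 1)
  else s

def pvOuterA (N : Int) (s : List (List Int) × List Int × Int) (i : Int) :
    List (List Int) × List Int × Int :=
  (PySem.List.pyRange (i + 1) N 1).foldl (pvInnerA i) s

def find_all_regular_graphs (N : Int) : Option (List (List Int)) :=
  let adj0 : List (List Int) := List.replicate N.toNat (List.replicate N.toNat 0)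
  let deg0 : List Int := List.replicate N.toNat (N - 1)
  let te0 : Int := PySem.Int.floordiv (N * (N - 1)) 2
  let s := (PySem.List.pyRange 0 (N - 1) 1).foldl (pvOuterA N) (adj0, deg0, te0)
  if s.2.2 = 0 ∧ (PySem.List.pyRange 0 N 1).all (fun i => PySem.List.pyGetD s.2.1 i 0 == 0)
  then some s.1 else none

-- ===== PORT B =====
def find_all_regular_graphs_alt (N : Int) : Option (List (List Int)) :=
  if N < 0 then none
  else some ((PySem.List.pyRange 0 N 1).map (fun i =>
        (PySem.List.pyRange 0 N 1).map (fun j => if i = j then (0 : Int) else 1)))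

-- ===== PRECONDITION & SPEC =====
def Spec_find_all_regular_graphs (N : Int) (out : Option (List (List Int))) : Prop := out = find_all_regular_graphs_alt N
instance (N : Int) (out : Option (List (List Int))) : Decidable (Spec_find_all_regular_graphs N out) := by unfold Spec_find_all_regular_graphs; infer_instance

-- ===== CLAIM (what is proved, stated in full; the proofs are below) =====
def Claim_equal_find_all_regular_graphs : Prop := ∀ (N : Int), Dom_find_all_regular_graphs N → Spec_find_all_regular_graphs N (find_all_regular_graphs N)

-- ===== LEMMAS AND PROOFS =====

def mkV {α : Type} (n : Nat) (d : Nat → α) : List α := (List.range n).map d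

def FI (i m : Int) (a b : Int) : Int :=
  if a = b then 0 else if min a b < i ∨ (min a b = i ∧ max a b < m) then 1 else 0

def DgI (N i m : Int) (a : Int) : Int :=
  if a < i then 0 else if a = i then N - m else if a < m then N - 2 - i else N - 1 - i

def TeI (N i m : Int) : Int := (N - i) * (N - i - 1) / 2 - (m - 1 - i)

def St (N i m : Int) : List (List Int) × List Int × Int :=
  (mkV N.toNat (fun a => mkV N.toNat (fun b => FI i m (a : Int) (b : Int))),
   mkV N.toNat (fun a => DgI N i m (a : Int)),
   TeI N i m)

theorem length_mkV {α : Type} (n : Nat) (d : Nat → α) : (mkV n d).length = n := by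
  simp [mkV]

theorem getD_mkV {α : Type} (n : Nat) (d : Nat → α) (i : Int) (dv : α)
    (h0 : 0 ≤ i) (h : i.toNat < n) :
    PySem.List.pyGetD (mkV n d) i dv = d i.toNat := by
  rw [PySem.List.pyGetD_eq_getElem _ _ h0 (by simp [length_mkV]; omega)]
  simp [mkV]

theorem set_mkV {α : Type} (n : Nat) (d : Nat → α) (i : Int) (v : α)
    (h0 : 0 ≤ i) (_h : i.toNat < n) :
    PySem.List.pySetD (mkV n d) i v = mkV n (fun t => if (t : Int) = i then v else d t) := by
  rw [PySem.List.pySetD_of_nonneg _ _ h0]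
  apply List.ext_getElem (by simp [mkV])
  intro k hk1 hk2
  simp only [mkV, List.length_map, List.length_range] at hk1 hk2
  simp only [mkV, List.getElem_set, List.getElem_map, List.getElem_range]
  by_cases hk : k = i.toNat
  · subst hk; simp [Int.toNat_of_nonneg h0]
  · rw [if_neg (by omega), if_neg (by omega)]

theorem mkV_congr {α : Type} (n : Nat) (d1 d2 : Nat → α)
    (h : ∀ t, t < n → d1 t = d2 t) : mkV n d1 = mkV n d2 :=
  List.map_congr_left (fun a ha => h a (List.mem_range.mp ha))

theorem inner_step (N i m : Int) (h0 : 0 ≤ i) (him : i + 1 ≤ m) (hmN : m < N) :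
    pvInnerA i (St N i m) m = St N i (m + 1) := by
  have hm0 : 0 ≤ m := by omega
  have hiN : i.toNat < N.toNat := by omega
  have hmN' : m.toNat < N.toNat := by omega
  have hti : (i.toNat : Int) = i := Int.toNat_of_nonneg h0
  have htm : (m.toNat : Int) = m := Int.toNat_of_nonneg hm0
  simp only [pvInnerA, St]
  rw [getD_mkV _ _ _ _ h0 hiN, getD_mkV _ _ _ _ hm0 hmN']
  rw [if_pos (by
    constructor <;> (simp only [DgI, hti, htm]; split_ifs <;> omega))]
  simp only [getD_mkV _ _ _ _ h0 hiN, getD_mkV _ _ _ _ hm0 hmN',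
    set_mkV _ _ _ _ h0 hiN, set_mkV _ _ _ _ hm0 hmN', hti, htm]
  refine Prod.ext ?_ (Prod.ext ?_ ?_)
  · apply mkV_congr
    intro t ht
    by_cases h1 : (t : Int) = m
    · rw [if_pos h1, if_neg (show ¬ m = i by omega), set_mkV _ _ _ _ h0 hiN]
      apply mkV_congr
      intro b hb
      rw [h1]
      simp only [FI]
      split_ifs <;> omega
    · rw [if_neg h1]
      by_cases h2 : (t : Int) = i
      · rw [if_pos h2]
        apply mkV_congr
        intro b hb
        rw [h2]
        simp only [FI]
        split_ifs <;> omega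
      · rw [if_neg h2]
        apply mkV_congr
        intro b hb
        simp only [FI]
        split_ifs <;> omega
  · apply mkV_congr
    intro t ht
    by_cases h1 : (t : Int) = m
    · rw [if_pos h1]
      simp only [DgI]
      split_ifs <;> omega
    · rw [if_neg h1]
      by_cases h2 : (t : Int) = i
      · rw [if_pos h2]
        simp only [DgI]
        split_ifs <;> omega
      · rw [if_neg h2]
        simp only [DgI]
        split_ifs <;> omega
  · simp only [TeI]
    ring_nf

theorem inner_loop (N i : Int) (h0 : 0 ≤ i) :
    ∀ (t : Nat) (m : Int), i + 1 ≤ m → m = N - t →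
      (PySem.List.pyRange m N 1).foldl (pvInnerA i) (St N i m) = St N i N := by
  intro t
  induction t with
  | zero =>
    intro m hm hmt
    have : m = N := by omega
    subst this
    rw [PySem.List.pyRange_one_eq_nil le_rfl]
    rfl
  | succ t ih =>
    intro m hm hmt
    have hmN : m < N := by omega
    rw [PySem.List.pyRange_one_cons hmN]
    simp only [List.foldl_cons]
    rw [inner_step N i m h0 hm hmN]
    exact ih (m + 1) (by omega) (by omega)

theorem outer_shift (N i : Int) (_h0 : 0 ≤ i) (_hiN : i + 1 ≤ N) :
    St N i N = St N (i + 1) (i + 2) := by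
  unfold St
  refine Prod.ext ?_ (Prod.ext ?_ ?_)
  · apply mkV_congr
    intro a ha
    apply mkV_congr
    intro b hb
    have haN : (a : Int) < N := by omega
    have hbN : (b : Int) < N := by omega
    simp only [FI]
    split_ifs <;> omega
  · apply mkV_congr
    intro a ha
    have haN : (a : Int) < N := by omega
    simp only [DgI]
    split_ifs <;> omega
  · simp only [TeI]
    have h1 : (N - i) * (N - i - 1) = (N - (i+1)) * (N - (i+1) - 1) + (N - i - 1) * 2 := by ring
    rw [h1, Int.add_mul_ediv_right _ _ (by norm_num : (2:Int) ≠ 0)]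
    ring

theorem outer_loop (N : Int) :
    ∀ (t : Nat) (k : Int), 0 ≤ k → k = N - 1 - t →
      (PySem.List.pyRange k (N - 1) 1).foldl (pvOuterA N) (St N k (k + 1)) = St N (N - 1) N := by
  intro t
  induction t with
  | zero =>
    intro k hk hkt
    have : k = N - 1 := by omega
    subst this
    rw [PySem.List.pyRange_one_eq_nil le_rfl]
    simp only [List.foldl_nil]
    congr 1
    omega
  | succ t ih =>
    intro k hk hkt
    have hkN : k < N - 1 := by omega
    rw [PySem.List.pyRange_one_cons hkN]
    simp only [List.foldl_cons]
    have hstep : pvOuterA N (St N k (k + 1)) k = St N (k + 1) (k + 2) := by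
      unfold pvOuterA
      rw [inner_loop N k hk (N - (k+1)).toNat (k + 1) le_rfl (by omega)]
      exact outer_shift N k hk (by omega)
    rw [hstep]
    have h2 : k + 1 + 1 = k + 2 := by ring
    rw [← h2]
    exact ih (k + 1) (by omega) (by omega)

theorem init_state (N : Int) (_hN : 1 ≤ N) :
    (List.replicate N.toNat (List.replicate N.toNat (0 : Int)),
     List.replicate N.toNat (N - 1),
     PySem.Int.floordiv (N * (N - 1)) 2) = St N 0 1 := by
  unfold St
  refine Prod.ext ?_ (Prod.ext ?_ ?_)
  · rw [show List.replicate N.toNat (List.replicate N.toNat (0:Int)) =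
        mkV N.toNat (fun _ => List.replicate N.toNat (0:Int)) by simp [mkV, List.map_const']]
    apply mkV_congr
    intro a ha
    rw [show List.replicate N.toNat (0:Int) = mkV N.toNat (fun _ => (0:Int)) by
      simp [mkV, List.map_const']]
    apply mkV_congr
    intro b hb
    simp only [FI]
    split_ifs <;> omega
  · rw [show List.replicate N.toNat (N - 1) = mkV N.toNat (fun _ => N - 1) by
      simp [mkV, List.map_const']]
    apply mkV_congr
    intro a ha
    simp only [DgI]
    split_ifs <;> omega
  · rw [PySem.Int.floordiv_eq_ediv_of_pos (by norm_num)]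
    simp only [TeI]
    ring_nf

theorem final_matrix (n : Nat) :
    mkV n (fun a => mkV n (fun b => FI ((n : Int) - 1) (n : Int) (a : Int) (b : Int))) =
      (PySem.List.pyRange 0 (n : Int) 1).map (fun i =>
        (PySem.List.pyRange 0 (n : Int) 1).map (fun j => if i = j then (0 : Int) else 1)) := by
  rw [PySem.List.pyRange_zero_nat, List.map_map]
  simp only [mkV]
  apply List.map_congr_left
  intro a ha
  have haN : a < n := List.mem_range.mp ha
  simp only [Function.comp_apply]
  rw [List.map_map]
  apply List.map_congr_left
  intro b hb
  have hbN : b < n := List.mem_range.mp hb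
  simp only [Function.comp_apply, FI]
  split_ifs <;> omega

-- ===== VERDICT (by name: the statement is the Claim_ definition above) =====
theorem find_all_regular_graphs_spec : Claim_equal_find_all_regular_graphs := by
  intro N _
  simp only [Spec_find_all_regular_graphs, find_all_regular_graphs, find_all_regular_graphs_alt]
  by_cases hneg : N < 0
  · -- loops are empty; total_edges = N*(N-1)//2 ≥ 1, so A returns none, as does B
    rw [PySem.List.pyRange_one_eq_nil (by omega)]
    simp only [List.foldl_nil]
    rw [PySem.Int.floordiv_eq_ediv_of_pos (by norm_num)]
    have h2 : 2 ≤ N * (N - 1) := by nlinarith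
    have hpos : 1 ≤ N * (N - 1) / 2 := by
      rw [Int.le_ediv_iff_mul_le (by norm_num)]
      omega
    rw [if_neg (fun h => by omega), if_pos hneg]
  · rw [if_neg hneg]
    by_cases hz : N = 0
    · subst hz; decide
    · have hN : 1 ≤ N := by omega
      rw [init_state N hN]
      rw [show St N 0 1 = St N 0 (0 + 1) from rfl]
      rw [outer_loop N (N - 1).toNat 0 le_rfl (by omega)]
      have hTe : TeI N (N - 1) N = 0 := by
        simp only [TeI]
        have : (N - (N - 1)) * (N - (N - 1) - 1) = 0 := by ring_nf
        omega
      have hall : (PySem.List.pyRange 0 N 1).all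
          (fun i => PySem.List.pyGetD (St N (N - 1) N).2.1 i 0 == 0) = true := by
        rw [List.all_eq_true]
        intro i hi
        have hmem := PySem.List.mem_pyRange_one.mp hi
        simp only [St]
        rw [getD_mkV _ _ _ _ hmem.1 (by omega)]
        have hti : ((i.toNat : Int)) = i := Int.toNat_of_nonneg hmem.1
        simp only [DgI, hti]
        simp only [beq_iff_eq]
        split_ifs <;> omega
      rw [if_pos ⟨by simpa [St] using hTe, hall⟩]
      simp only [St]
      obtain ⟨n, rfl⟩ : ∃ n : Nat, N = (n : Int) := ⟨N.toNat, (Int.toNat_of_nonneg (by omega)).symm⟩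
      rw [show ((n : Int)).toNat = n from Int.toNat_natCast n]
      rw [final_matrix n]
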